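-- pv_equiv track=rewrite | github.com/violetdenim/kapitza_bot | src/utils.py | drop_ending
-- ===== SOURCE A (Python) =====
-- def drop_ending(some_text, endings='.!?'):
--     p = len(some_text) - 1
--     while p >= 0 and some_text == ' ':
--         p -= 1
--     if p < 0 or some_text[p] in endings:
--         return some_text[:p+1]
--     while p >= 0 and some_text[p] not in endings:
--         p -= 1
--     if p < 0:
--         return ""
--     return some_text[:p+1]
-- ===== SOURCE B (Python) =====
-- def drop_ending(some_text, endings='.!?'):
--     idx = -1
--     for i, c in enumerate(some_text):
--         if c in endings:
--             idx = i
--     return some_text[:idx+1]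
-- ===== Notes on version B (the rewrite author's own statement) =====
-- stated objective: simpler
-- what changed: A walks backwards with an index and two while-loops plus a three-way branch; B is a single forward pass that remembers the last index whose character is in endings and slices once.
-- intended difference: On the single input some_text == ' ' with ' ' among endings, A returns '' because of the typo `some_text == ' '` (comparing the whole string where the character at p was meant), while B returns ' ', the prefix up to the last ending character, which is the rule A itself applies on every other input. — e.g. on drop_ending(" ", ". !"): A returns "", B returns " "
import Mathlib
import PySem

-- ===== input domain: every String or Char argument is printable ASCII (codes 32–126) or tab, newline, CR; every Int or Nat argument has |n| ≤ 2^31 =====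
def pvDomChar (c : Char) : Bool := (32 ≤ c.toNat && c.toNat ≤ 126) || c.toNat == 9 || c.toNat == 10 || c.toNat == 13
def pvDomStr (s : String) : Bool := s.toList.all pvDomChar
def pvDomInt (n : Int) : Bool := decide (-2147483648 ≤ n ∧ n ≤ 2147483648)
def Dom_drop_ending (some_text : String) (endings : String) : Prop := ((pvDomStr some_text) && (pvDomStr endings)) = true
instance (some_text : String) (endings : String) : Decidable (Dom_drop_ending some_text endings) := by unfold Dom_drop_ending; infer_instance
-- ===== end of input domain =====

-- B replaces A's backward two-while-loop scan by a single forward pass that keeps the last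
-- index whose character is in `endings` (objective: simpler); return-value equivalence.

-- ===== PORT A =====
-- `while p >= 0 and some_text == ' ': p -= 1`
def peLoop1 (t : String) (p : Int) : Int :=
  if h : 0 ≤ p ∧ (t == " ") = true then peLoop1 t (p - 1) else p
termination_by (p + 1).toNat
decreasing_by omega

-- `some_text[p] in endings` (only evaluated at in-range p; a 1-char string in a str is char membership)
def peChar (t e : String) (p : Int) : Bool :=
  match PySem.Str.pyGet? t p with
  | some c => e.toList.contains c
  | none => false

-- `while p >= 0 and some_text[p] not in endings: p -= 1`
def peLoop2 (t e : String) (p : Int) : Int :=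
  if h : 0 ≤ p ∧ peChar t e p = false then peLoop2 t e (p - 1) else p
termination_by (p + 1).toNat
decreasing_by omega

def drop_ending (some_text : String) (endings : String) : String :=
  let p := peLoop1 some_text ((PySem.Str.len some_text : Int) - 1)
  if p < 0 ∨ peChar some_text endings p = true then
    PySem.Str.slice some_text none (some (p + 1))
  else
    let p2 := peLoop2 some_text endings p
    if p2 < 0 then "" else PySem.Str.slice some_text none (some (p2 + 1))

-- ===== PORT B =====
-- `idx = -1; for i, c in enumerate(some_text): if c in endings: idx = i; return some_text[:idx+1]`
def drop_ending_alt (some_text : String) (endings : String) : String :=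
  let idx : Int := (PySem.List.enumerate some_text.toList 0).foldl
      (fun acc ic => if endings.toList.contains ic.2 then ic.1 else acc) (-1)
  PySem.Str.slice some_text none (some (idx + 1))

-- ===== PRECONDITION & SPEC =====
-- On the single input some_text = " " with ' ' among endings, A returns "" because of the
-- `some_text == ' '` typo (the whole string is compared where the character at p was meant);
-- B returns " ", the prefix up to the last ending character — the rule A applies everywhere else.
def D_drop_ending (some_text : String) (endings : String) : Prop :=
  some_text = " " ∧ endings.toList.contains ' ' = true
instance (some_text : String) (endings : String) : Decidable (D_drop_ending some_text endings) := by
  unfold D_drop_ending; infer_instance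

def Spec_drop_ending (some_text : String) (endings : String) (out : String) : Prop :=
  ¬ D_drop_ending some_text endings → out = drop_ending_alt some_text endings
instance (some_text : String) (endings : String) (out : String) : Decidable (Spec_drop_ending some_text endings out) := by
  unfold Spec_drop_ending; infer_instance

def pvDiffWitness_drop_ending : String × String := (" ", ". !")
def pvDiffWitnessOut_drop_ending : String × String := ("", " ")

-- ===== CLAIM (what is proved, stated in full; the proofs are below) =====
def Claim_unchanged_drop_ending : Prop := ∀ (some_text : String) (endings : String), Dom_drop_ending some_text endings → Spec_drop_ending some_text endings (drop_ending some_text endings)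
def Claim_changed_drop_ending : Prop := Dom_drop_ending (pvDiffWitness_drop_ending.1) (pvDiffWitness_drop_ending.2) ∧ D_drop_ending (pvDiffWitness_drop_ending.1) (pvDiffWitness_drop_ending.2) ∧ drop_ending (pvDiffWitness_drop_ending.1) (pvDiffWitness_drop_ending.2) = pvDiffWitnessOut_drop_ending.1 ∧ drop_ending_alt (pvDiffWitness_drop_ending.1) (pvDiffWitness_drop_ending.2) = pvDiffWitnessOut_drop_ending.2 ∧ pvDiffWitnessOut_drop_ending.1 ≠ pvDiffWitnessOut_drop_ending.2
def Claim_exact_drop_ending : Prop := ∀ (some_text : String) (endings : String), Dom_drop_ending some_text endings → D_drop_ending some_text endings → drop_ending some_text endings ≠ drop_ending_alt some_text endings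

-- ===== LEMMAS AND PROOFS =====

theorem peLoop1_of_ne (t : String) (p : Int) (h : (t == " ") = false) : peLoop1 t p = p := by
  unfold peLoop1
  rw [dif_neg (by simp [h])]

theorem peLoop1_neg (t : String) (p : Int) (h : p < 0) : peLoop1 t p = p := by
  unfold peLoop1
  rw [dif_neg (by intro ⟨h1, _⟩; omega)]

theorem peLoop1_space_aux (n : Nat) : ∀ (p : Int), (p + 1).toNat ≤ n → 0 ≤ p → peLoop1 " " p = -1 := by
  induction n with
  | zero => intro p h h0; omega
  | succ k ih =>
    intro p h h0
    unfold peLoop1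
    rw [dif_pos ⟨h0, by decide⟩]
    by_cases h1 : 0 ≤ p - 1
    · exact ih (p - 1) (by omega) h1
    · rw [peLoop1_neg _ _ (by omega)]; omega

theorem peLoop1_space (p : Int) (h : 0 ≤ p) : peLoop1 " " p = -1 :=
  peLoop1_space_aux (p + 1).toNat p le_rfl h

theorem peLoop2_neg (t e : String) (p : Int) (h : p < 0) : peLoop2 t e p = p := by
  unfold peLoop2
  rw [dif_neg (by intro ⟨h1, _⟩; omega)]

theorem enumerate_append {α : Type} (l1 l2 : List α) (k : Int) :
    PySem.List.enumerate (l1 ++ l2) k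
      = PySem.List.enumerate l1 k ++ PySem.List.enumerate l2 (k + l1.length) := by
  induction l1 generalizing k with
  | nil => simp [PySem.List.enumerate_nil]
  | cons x xs ih =>
    simp [PySem.List.enumerate_cons, ih (k + 1)]
    ring_nf

-- B's accumulator, as a function of the processed prefix of the text
def peIdx (e : List Char) (l : List Char) : Int :=
  (PySem.List.enumerate l 0).foldl (fun acc ic => if e.contains ic.2 then ic.1 else acc) (-1)

theorem peIdx_concat (e l : List Char) (c : Char) :
    peIdx e (l ++ [c]) = if e.contains c then (l.length : Int) else peIdx e l := by
  unfold peIdx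
  rw [enumerate_append, List.foldl_append]
  simp [PySem.List.enumerate_cons, PySem.List.enumerate_nil]

theorem peIdx_lb (e l : List Char) : -1 ≤ peIdx e l := by
  induction l using List.reverseRecOn with
  | nil => simp [peIdx, PySem.List.enumerate_nil]
  | append_singleton xs x ih =>
    rw [peIdx_concat]
    split_ifs with h
    · omega
    · exact ih

theorem peChar_eq (t e : String) (p : Nat) (hp : p < t.toList.length) :
    peChar t e (p : Int) = e.toList.contains (t.toList[p]'hp) := by
  simp [peChar, List.getElem?_eq_getElem hp]

theorem slice_zero (t : String) : PySem.Str.slice t none (some 0) = "" := by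
  simp [PySem.Str.slice]
  rw [show (0 : Int) = ((0 : Nat) : Int) from rfl, PySem.List.slice_to_natCast]
  simp

-- core: A's backward scan from p equals B's forward accumulator over the first p+1 characters
theorem peLoop2_eq_peIdx (t e : String) (p : Nat) (hp : p < t.toList.length) :
    peLoop2 t e (p : Int) = peIdx e.toList (t.toList.take (p + 1)) := by
  induction p with
  | zero =>
    have htake : t.toList.take (0 + 1) = t.toList.take 0 ++ [t.toList[0]'hp] := by
      rw [List.take_add_one, List.getElem?_eq_getElem hp]; rfl
    rw [htake, peIdx_concat]
    have hc := peChar_eq t e 0 hp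
    simp only [Nat.cast_zero] at hc ⊢
    cases hcon : e.toList.contains (t.toList[0]'hp) with
    | true =>
      unfold peLoop2
      rw [dif_neg (by intro hand; rw [hc, hcon] at hand; simp at hand)]
      rw [if_pos rfl]
      simp
    | false =>
      unfold peLoop2
      rw [dif_pos ⟨le_rfl, by rw [hc, hcon]⟩]
      rw [show (0 : Int) - 1 = -1 by ring, peLoop2_neg _ _ _ (by norm_num)]
      rw [if_neg (by simp)]
      simp [peIdx, PySem.List.enumerate_nil]
  | succ k ih =>
    have hk : k < t.toList.length := by omega
    have htake : t.toList.take (k + 1 + 1) = t.toList.take (k + 1) ++ [t.toList[k+1]'hp] := by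
      rw [List.take_add_one, List.getElem?_eq_getElem hp]; rfl
    rw [htake, peIdx_concat]
    have hlen : (t.toList.take (k + 1)).length = k + 1 := by
      rw [List.length_take]; omega
    have hc := peChar_eq t e (k + 1) hp
    cases hcon : e.toList.contains (t.toList[k+1]'hp) with
    | true =>
      unfold peLoop2
      rw [dif_neg (by intro hand; rw [hc, hcon] at hand; simp at hand)]
      rw [if_pos rfl, hlen]
    | false =>
      unfold peLoop2
      rw [dif_pos ⟨by omega, by rw [hc, hcon]⟩]
      rw [show (((k + 1 : Nat) : Int)) - 1 = (k : Int) by push_cast; ring]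
      rw [if_neg (by simp)]
      exact ih hk

theorem drop_ending_eq_core (t e : String) (hD : ¬ D_drop_ending t e) :
    drop_ending t e = drop_ending_alt t e := by
  by_cases hsp : t = " "
  · -- single-space text: A's first loop drives p to -1; outside D_, ' ' is not an ending
    subst hsp
    have hne : e.toList.contains ' ' = false := by
      by_cases h : e.toList.contains ' ' = true
      · exact absurd ⟨rfl, h⟩ hD
      · simpa using h
    unfold drop_ending drop_ending_alt
    rw [show (PySem.Str.len " " : Int) - 1 = 0 by decide]
    rw [peLoop1_space 0 le_rfl]
    rw [if_pos (Or.inl (by norm_num))]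
    have hne' : ' ' ∉ e.toList := by simpa using hne
    rw [show (" " : String).toList = [' '] from rfl]
    simp [PySem.List.enumerate_cons, PySem.List.enumerate_nil, hne']
  · -- t ≠ " ": A's first loop is a no-op
    have hbeq : (t == " ") = false := by simpa using hsp
    unfold drop_ending drop_ending_alt
    rw [peLoop1_of_ne t _ hbeq]
    by_cases hnil : t.toList.length = 0
    · -- empty text: both slice at 0
      have htl : t.toList = [] := List.length_eq_zero_iff.mp hnil
      rw [show (PySem.Str.len t : Int) - 1 = -1 by simp [PySem.Str.len_eq, hnil]]
      rw [if_pos (Or.inl (by norm_num))]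
      rw [htl]
      simp [PySem.List.enumerate_nil]
    · -- nonempty text
      have hn : 0 < t.toList.length := Nat.pos_of_ne_zero hnil
      have hn' : 0 < t.length := by simpa using hn
      have hp : t.toList.length - 1 < t.toList.length := by omega
      rw [show (PySem.Str.len t : Int) - 1 = ((t.toList.length - 1 : Nat) : Int) by
        simp [PySem.Str.len_eq]; omega]
      have hidx : (PySem.List.enumerate t.toList 0).foldl
          (fun acc ic => if e.toList.contains ic.2 then ic.1 else acc) (-1)
          = peIdx e.toList (t.toList.take (t.toList.length - 1 + 1)) := by
        rw [show t.toList.length - 1 + 1 = t.toList.length by omega, List.take_length]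
        rfl
      have htake : t.toList.take (t.toList.length - 1 + 1) =
          t.toList.take (t.toList.length - 1) ++ [t.toList[t.toList.length - 1]'hp] := by
        rw [List.take_add_one, List.getElem?_eq_getElem hp]; rfl
      by_cases hlast : e.toList.contains (t.toList[t.toList.length - 1]'hp) = true
      · -- last char is an ending: both keep the whole string
        have hch : peChar t e ((t.toList.length - 1 : Nat) : Int) = true := by
          rw [peChar_eq t e _ hp]; exact hlast
        rw [if_pos (Or.inr hch)]
        rw [hidx, htake, peIdx_concat, if_pos hlast]
        rw [show (t.toList.take (t.toList.length - 1)).length = t.toList.length - 1 by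
          rw [List.length_take]; omega]
      · -- scan back: A's second loop equals B's accumulator
        have hch : peChar t e ((t.toList.length - 1 : Nat) : Int) = false := by
          rw [peChar_eq t e _ hp]; simpa using hlast
        rw [if_neg (by intro hor; cases hor with
          | inl h => omega
          | inr h => rw [hch] at h; simp at h)]
        rw [peLoop2_eq_peIdx t e _ hp, hidx]
        set q := peIdx e.toList (t.toList.take (t.toList.length - 1 + 1)) with hq
        by_cases hq0 : q < 0
        · have hqm : q = -1 := by
            have := peIdx_lb e.toList (t.toList.take (t.toList.length - 1 + 1))
            omega
          rw [if_pos hq0, hqm]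
          show ("" : String) = PySem.Str.slice t none (some ((-1 : Int) + 1))
          rw [show (-1 : Int) + 1 = 0 by ring, slice_zero]
        · rw [if_neg hq0]

theorem dropA_space (e : String) : drop_ending " " e = "" := by
  unfold drop_ending
  rw [show (PySem.Str.len " " : Int) - 1 = 0 by decide]
  rw [peLoop1_space 0 le_rfl]
  rw [if_pos (Or.inl (by norm_num))]
  rw [show (-1 : Int) + 1 = 0 by ring, slice_zero]

-- ===== VERDICT (by name: the statement is the Claim_ definition above) =====
theorem drop_ending_spec : Claim_unchanged_drop_ending := by
  intro t e _ hD
  exact drop_ending_eq_core t e hD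

theorem drop_ending_changed : Claim_changed_drop_ending := by
  unfold Claim_changed_drop_ending
  refine ⟨by decide, by decide, dropA_space ". !", by decide, by decide⟩

theorem drop_ending_tight : Claim_exact_drop_ending := by
  intro t e _ hD
  obtain ⟨ht, hcont⟩ := hD
  subst ht
  have hcont' : ' ' ∈ e.toList := by simpa using hcont
  have hB : drop_ending_alt " " e = PySem.Str.slice " " none (some 1) := by
    unfold drop_ending_alt
    rw [show (" " : String).toList = [' '] from rfl]
    simp [PySem.List.enumerate_cons, PySem.List.enumerate_nil, hcont']
  rw [dropA_space e, hB]
  decide
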